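-- pv_equiv track=rewrite | github.com/Rogoyin/Modulio | Listio.py | Slice_Iterable_By_Reference
-- ===== SOURCE A (Python) =====
-- def Slice_Iterable_By_Reference(Iterable, Base_Element, Remove = 'Before', Include = True, Appears = 1):
--
--     if Base_Element not in Iterable:
--         raise KeyError('The element must be in the iterable.')
--
--     Count = 0
--     for Index, Element in enumerate(Iterable):
--         if Element == Base_Element:
--             Count += 1
--             if Count == Appears:
--                 if Remove == 'Before':
--                     if Include == False:
--                         Index += 1
--                     Iterable = Iterable[Index:]
--                 else:
--                     if Include:
--                         Index += 1
--                     Iterable = Iterable[:Index]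
--     return Iterable
-- ===== SOURCE B (Python) =====
-- def Slice_Iterable_By_Reference(Iterable, Base_Element, Remove = 'Before', Include = True, Appears = 1):
--
--     if Base_Element not in Iterable:
--         raise KeyError('The element must be in the iterable.')
--
--     if Appears < 1 or Appears > Iterable.count(Base_Element):
--         return Iterable
--
--     idx = -1
--     for _ in range(Appears):
--         idx = Iterable.index(Base_Element, idx + 1)
--
--     if Remove == 'Before':
--         return Iterable[idx if Include else idx + 1:]
--     else:
--         return Iterable[:idx + 1 if Include else idx]
-- ===== Notes on version B (the rewrite author's own statement) =====
-- stated objective: alternative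
-- what changed: B never scans elements itself: it guards with list.count, then hops to the N-th occurrence by repeating list.index(x, start) Appears times, and performs one slice at the end — replacing A's stateful element-wise loop that slices the running list inside the loop.
-- outside the precondition, e.g. on Slice_Iterable_By_Reference([1], 2, 'Before', True, 1): A raises KeyError, B raises KeyError
import Mathlib
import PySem

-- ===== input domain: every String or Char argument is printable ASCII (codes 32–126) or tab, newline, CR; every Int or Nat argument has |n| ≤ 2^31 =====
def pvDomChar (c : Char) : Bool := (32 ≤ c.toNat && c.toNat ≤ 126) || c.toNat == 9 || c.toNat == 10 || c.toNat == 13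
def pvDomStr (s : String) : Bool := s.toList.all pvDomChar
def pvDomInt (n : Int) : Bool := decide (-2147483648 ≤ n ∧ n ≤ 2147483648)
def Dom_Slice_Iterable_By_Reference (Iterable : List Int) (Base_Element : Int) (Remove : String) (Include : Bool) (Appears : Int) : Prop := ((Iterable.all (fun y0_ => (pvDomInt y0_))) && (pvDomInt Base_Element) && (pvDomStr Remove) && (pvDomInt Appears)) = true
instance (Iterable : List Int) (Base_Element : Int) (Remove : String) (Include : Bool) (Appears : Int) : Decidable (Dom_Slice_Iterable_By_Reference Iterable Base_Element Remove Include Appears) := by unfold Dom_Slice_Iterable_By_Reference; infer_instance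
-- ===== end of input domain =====

-- B finds the N-th occurrence by repeated list.index(x, start) hops after a count guard, then slices once (objective: alternative).

-- ===== PORT A =====
-- A's for-loop over enumerate(Iterable) with state (Count, Iterable); transliterated as structural recursion.
def pvLoopA (b : Int) (rm : String) (inc : Bool) (ap : Int) :
    List (Int × Int) → Int → List Int → List Int
  | [], _, cur => cur
  | (i, e) :: rest, count, cur =>
    if e == b then
      let count' := count + 1
      if count' == ap then
        if rm == "Before" then
          let i' := if inc == false then i + 1 else i
          pvLoopA b rm inc ap rest count' (PySem.List.slice cur (some i') none)
        else
          let i' := if inc then i + 1 else i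
          pvLoopA b rm inc ap rest count' (PySem.List.slice cur none (some i'))
      else pvLoopA b rm inc ap rest count' cur
    else pvLoopA b rm inc ap rest count cur

def Slice_Iterable_By_Reference (Iterable : List Int) (Base_Element : Int) (Remove : String) (Include : Bool) (Appears : Int) : List Int :=
  if !(Iterable.contains Base_Element) then []  -- Python raises KeyError here; excluded by Pre_
  else pvLoopA Base_Element Remove Include Appears (PySem.List.enumerate Iterable 0) 0 Iterable

-- ===== PORT B =====
-- hand port of Python's list.index(x, start) for a nonnegative start: first index ≥ start holding x.
-- (none = ValueError; B only calls it when the occurrence exists, so the 0 default is never reached there)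
def pvIndexFrom (xs : List Int) (x : Int) (start : Int) : Int :=
  match PySem.List.index? (xs.drop start.toNat) x with
  | some j => start + (j : Int)
  | none => 0

def Slice_Iterable_By_Reference_alt (Iterable : List Int) (Base_Element : Int) (Remove : String) (Include : Bool) (Appears : Int) : List Int :=
  if !(Iterable.contains Base_Element) then []  -- Python raises KeyError here; excluded by Pre_
  else if Appears < 1 ∨ (PySem.List.count Iterable Base_Element : Int) < Appears then Iterable
  else
    let idx := (PySem.List.pyRange 0 Appears 1).foldl
      (fun idx _ => pvIndexFrom Iterable Base_Element (idx + 1)) (-1)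
    if Remove == "Before" then
      PySem.List.slice Iterable (some (if Include then idx else idx + 1)) none
    else
      PySem.List.slice Iterable none (some (if Include then idx + 1 else idx))

-- ===== PRECONDITION & SPEC =====
-- Pre_ excludes exactly the inputs where A raises KeyError (Base_Element not in Iterable).
def Pre_Slice_Iterable_By_Reference (Iterable : List Int) (Base_Element : Int) (Remove : String) (Include : Bool) (Appears : Int) : Prop :=
  Base_Element ∈ Iterable
instance (Iterable : List Int) (Base_Element : Int) (Remove : String) (Include : Bool) (Appears : Int) : Decidable (Pre_Slice_Iterable_By_Reference Iterable Base_Element Remove Include Appears) := by unfold Pre_Slice_Iterable_By_Reference; infer_instance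

def pvWitness_Slice_Iterable_By_Reference : List Int × Int × String × Bool × Int := ([1, 2, 3, 2], 2, "Before", true, 1)

def Spec_Slice_Iterable_By_Reference (Iterable : List Int) (Base_Element : Int) (Remove : String) (Include : Bool) (Appears : Int) (out : List Int) : Prop := out = Slice_Iterable_By_Reference_alt Iterable Base_Element Remove Include Appears
instance (Iterable : List Int) (Base_Element : Int) (Remove : String) (Include : Bool) (Appears : Int) (out : List Int) : Decidable (Spec_Slice_Iterable_By_Reference Iterable Base_Element Remove Include Appears out) := by unfold Spec_Slice_Iterable_By_Reference; infer_instance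

-- ===== CLAIM =====
def Claim_equal_Slice_Iterable_By_Reference : Prop := ∀ (Iterable : List Int) (Base_Element : Int) (Remove : String) (Include : Bool) (Appears : Int), Dom_Slice_Iterable_By_Reference Iterable Base_Element Remove Include Appears → Pre_Slice_Iterable_By_Reference Iterable Base_Element Remove Include Appears → Spec_Slice_Iterable_By_Reference Iterable Base_Element Remove Include Appears (Slice_Iterable_By_Reference Iterable Base_Element Remove Include Appears)

-- ===== LEMMAS AND PROOFS =====

-- The common "one slice" operation both programs end up performing.
def pvDoSlice (rm : String) (inc : Bool) (cur : List Int) (i : Int) : List Int :=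
  if rm == "Before" then
    PySem.List.slice cur (some (if inc == false then i + 1 else i)) none
  else
    PySem.List.slice cur none (some (if inc then i + 1 else i))

-- Characterisation of A's loop: it fires at most once, at the (ap - count)-th remaining occurrence.
theorem pvLoopA_eq (b : Int) (rm : String) (inc : Bool) (ap : Int) :
    ∀ (l : List (Int × Int)) (count : Int) (cur : List Int),
    pvLoopA b rm inc ap l count cur =
      (let ps := (l.filter (fun p => p.2 == b)).map (·.1)
       if 1 ≤ ap - count ∧ ap - count ≤ (ps.length : Int) then
         pvDoSlice rm inc cur (ps.getD (ap - count - 1).toNat 0)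
       else cur) := by
  intro l
  induction l with
  | nil =>
    intro count cur
    simp only [pvLoopA, List.filter_nil, List.map_nil, List.length_nil]
    rw [if_neg (by omega)]
  | cons hd rest ih =>
    intro count cur
    obtain ⟨i, e⟩ := hd
    by_cases he : e = b
    · have hb : ((e : Int) == b) = true := by simpa using he
      by_cases hfire : count + 1 = ap
      · have h1 : ((count + 1 : Int) == ap) = true := by simpa using hfire
        simp only [pvLoopA, hb, if_true, h1, ih,
          List.filter_cons, List.map_cons, List.length_cons]
        have hnofire : ¬ (1 ≤ ap - (count + 1) ∧ ap - (count + 1) ≤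
            (((rest.filter (fun p => p.2 == b)).map (·.1)).length : Int)) := by omega
        have hyes : 1 ≤ ap - count ∧ ap - count ≤
            ((((rest.filter (fun p => p.2 == b)).map (·.1)).length + 1 : Nat) : Int) := by
          push_cast; omega
        have h0 : (ap - count - 1).toNat = 0 := by omega
        rw [if_neg hnofire, if_neg hnofire, if_pos hyes, h0, List.getD_cons_zero]
        rfl
      · have h1 : ((count + 1 : Int) == ap) = false := by simpa using hfire
        simp only [pvLoopA, hb, if_true, h1, Bool.false_eq_true, if_false, ih,
          List.filter_cons, List.map_cons, List.length_cons]
        by_cases hc : 1 ≤ ap - (count + 1) ∧ ap - (count + 1) ≤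
            (((rest.filter (fun p => p.2 == b)).map (·.1)).length : Int)
        · have hn : (ap - count - 1).toNat = (ap - (count + 1) - 1).toNat + 1 := by omega
          rw [if_pos hc, if_pos (by push_cast; omega), hn, List.getD_cons_succ]
        · rw [if_neg hc, if_neg (by push_cast; omega)]
    · have h1 : ((e : Int) == b) = false := by simpa using he
      simp only [pvLoopA, h1, Bool.false_eq_true, if_false, ih, List.filter_cons]

-- occurrence indices of x in l, ascending
def pvPos (l : List Int) (x : Int) : List Nat :=
  match l with
  | [] => []
  | a :: t => if a = x then 0 :: (pvPos t x).map (· + 1) else (pvPos t x).map (· + 1)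

theorem pvPos_pairwise (l : List Int) (x : Int) : (pvPos l x).Pairwise (· < ·) := by
  induction l with
  | nil => simp [pvPos]
  | cons a t ih =>
    simp only [pvPos]
    split_ifs
    · exact List.Pairwise.cons (by simp) ((List.pairwise_map).mpr (ih.imp (by omega)))
    · exact (List.pairwise_map).mpr (ih.imp (by omega))

theorem pvCount_eq (l : List Int) (x : Int) : PySem.List.count l x = (pvPos l x).length := by
  induction l with
  | nil => simp [pvPos, PySem.List.count]
  | cons a t ih =>
    by_cases h : a = x <;>
      simp [pvPos, h, PySem.List.count] at ih ⊢ <;> omega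

-- A-side positions (enumerate/filter form) are pvPos shifted by the offset
theorem pvEnum_pos (l : List Int) (x : Int) : ∀ s : Int,
    ((PySem.List.enumerate l s).filter (fun p => p.2 == x)).map (·.1)
      = (pvPos l x).map (fun p : Nat => s + (p : Int)) := by
  induction l with
  | nil => intro s; simp [PySem.List.enumerate_nil, pvPos]
  | cons a t ih =>
    intro s
    have htail : ((PySem.List.enumerate t (s + 1)).filter (fun p => p.2 == x)).map (·.1)
        = ((pvPos t x).map (fun p : Nat => p + 1)).map (fun p : Nat => s + (p : Int)) := by
      rw [ih (s + 1), List.map_map]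
      apply List.map_congr_left
      intro p _
      simp only [Function.comp_apply]
      push_cast; ring
    rw [PySem.List.enumerate_cons]
    by_cases h : a = x
    · simp only [pvPos, if_pos h, List.filter_cons]
      rw [if_pos (by simpa using h)]
      simp only [List.map_cons, htail]
      norm_num
    · simp only [pvPos, if_neg h, List.filter_cons]
      rw [if_neg (by simpa using h)]
      exact htail

-- list.index on a dropped prefix = first occurrence index ≥ s, shifted
theorem pvIndex_drop (l : List Int) (x : Int) : ∀ s : Nat,
    PySem.List.index? (l.drop s) x
      = ((pvPos l x).filter (fun p => s ≤ p)).head?.map (· - s) := by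
  induction l with
  | nil => intro s; simp [PySem.List.index?_eq_idxOf?, pvPos, List.idxOf?]
  | cons a t ih =>
    intro s
    cases s with
    | zero =>
      have h0 : ∀ (ps : List Nat), ps.filter (fun p => decide (0 ≤ p)) = ps := by
        intro ps; apply List.filter_eq_self.mpr; intro p _; simp
      by_cases h : a = x
      · subst h; rw [List.drop_zero, PySem.List.index?_cons_self]
        simp [pvPos]
      · rw [List.drop_zero, PySem.List.index?_cons_of_ne t (by simpa using h)]
        have := ih 0
        rw [List.drop_zero, h0] at this
        simp only [pvPos, if_neg h, h0, List.head?_map, this]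
        cases (pvPos t x).head? <;> simp
    | succ k =>
      rw [List.drop_succ_cons, ih k]
      have hmap : ((pvPos t x).map (· + 1)).filter (fun p => decide (k + 1 ≤ p))
          = ((pvPos t x).filter (fun p => decide (k ≤ p))).map (· + 1) := by
        rw [List.filter_map]
        congr 1
        apply List.filter_congr
        intro p _
        simp only [Function.comp_apply, decide_eq_decide]
        omega
      by_cases h : a = x
      · simp only [pvPos, if_pos h, List.filter_cons]
        rw [if_neg (by simp), hmap, List.head?_map]
        cases ((pvPos t x).filter (fun p => decide (k ≤ p))).head? with
        | none => simp
        | some q => simp only [Option.map_some]; congr 1; omega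
      · simp only [pvPos, if_neg h]
        rw [hmap, List.head?_map]
        cases ((pvPos t x).filter (fun p => decide (k ≤ p))).head? with
        | none => simp
        | some q => simp only [Option.map_some]; congr 1; omega

-- for a strictly increasing list, filtering above the k-th element drops the first k+1
theorem pvFilter_drop (ps : List Nat) (hps : ps.Pairwise (· < ·)) :
    ∀ k (hk : k < ps.length),
      ps.filter (fun p => ps[k] + 1 ≤ p) = ps.drop (k + 1) := by
  induction ps with
  | nil => intro k hk; simp at hk
  | cons a t ih =>
    intro k hk
    cases k with
    | zero =>
      simp only [List.getElem_cons_zero, List.filter_cons]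
      rw [if_neg (by simp), List.drop_one]
      apply List.filter_eq_self.mpr
      intro p hp
      have := (List.pairwise_cons.mp hps).1 p hp
      simp; omega
    | succ k =>
      have ht := (List.pairwise_cons.mp hps).2
      have hk' : k < t.length := by simpa using hk
      have hmem : t[k] ∈ t := List.getElem_mem _
      have hat : a < t[k] := (List.pairwise_cons.mp hps).1 _ hmem
      simp only [List.getElem_cons_succ, List.filter_cons, List.drop_succ_cons]
      rw [if_neg (by simp; omega)]
      exact ih ht k hk'

-- the B-side fold of repeated index hops lands on the k-th occurrence
theorem pvFold_range (xs : List Int) (x : Int) :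
    ∀ k (hk : k < (pvPos xs x).length),
      (List.range (k + 1)).foldl (fun idx _ => pvIndexFrom xs x (idx + 1)) (-1)
        = ((pvPos xs x)[k] : Int) := by
  intro k
  induction k with
  | zero =>
    intro hk
    have h := pvIndex_drop xs x 0
    have h0 : ((pvPos xs x).filter (fun p => decide (0 ≤ p))) = pvPos xs x := by
      apply List.filter_eq_self.mpr; intro q _; simp
    rw [h0] at h
    simp only [List.range_succ, List.range_zero, List.nil_append, List.foldl_cons,
      List.foldl_nil, pvIndexFrom]
    rw [show ((-1 : Int) + 1).toNat = 0 by norm_num, h,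
      List.head?_eq_getElem?, List.getElem?_eq_getElem hk]
    simp
  | succ k ih =>
    intro hk
    have hk' : k < (pvPos xs x).length := by omega
    rw [List.range_succ, List.foldl_append, ih hk']
    simp only [List.foldl_cons, List.foldl_nil]
    have hmono := pvPos_pairwise xs x
    have hlt : (pvPos xs x)[k] < (pvPos xs x)[k + 1] :=
      (List.pairwise_iff_getElem.mp hmono) k (k + 1) hk' hk (by omega)
    have htn : (((pvPos xs x)[k] : Int) + 1).toNat = (pvPos xs x)[k] + 1 := by omega
    simp only [pvIndexFrom, htn]
    rw [pvIndex_drop xs x ((pvPos xs x)[k] + 1),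
      pvFilter_drop (pvPos xs x) hmono k hk']
    rw [List.head?_drop, List.getElem?_eq_getElem hk]
    simp only [Option.map_some]
    omega

-- ===== VERDICT =====
theorem Slice_Iterable_By_Reference_spec : Claim_equal_Slice_Iterable_By_Reference := by
  intro xs b rm inc ap _ hpre
  unfold Spec_Slice_Iterable_By_Reference Slice_Iterable_By_Reference Slice_Iterable_By_Reference_alt
  have hmem : xs.contains b = true := by simpa using hpre
  rw [if_neg (by rw [hmem]; simp), if_neg (by rw [hmem]; simp), pvLoopA_eq]
  simp only [sub_zero]
  set ps := pvPos xs b with hdef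
  have hps : ((PySem.List.enumerate xs 0).filter (fun p => p.2 == b)).map (·.1)
      = ps.map (fun p : Nat => (p : Int)) := by
    rw [pvEnum_pos xs b 0]
    apply List.map_congr_left
    intro p _
    rw [zero_add]
  have hlenmap : (ps.map (fun p : Nat => (p : Int))).length = ps.length := List.length_map _
  rw [hps, pvCount_eq, ← hdef]
  by_cases hcond : 1 ≤ ap ∧ ap ≤ ((ps.map (fun p : Nat => (p : Int))).length : Int)
  · have hlen : (ap - 1).toNat < ps.length := by
      rw [hlenmap] at hcond; omega
    rw [if_pos hcond, if_neg (by rw [hlenmap] at hcond; omega)]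
    have hfold : (PySem.List.pyRange 0 ap 1).foldl
        (fun idx _ => pvIndexFrom xs b (idx + 1)) (-1) = ((ps[(ap - 1).toNat] : Int)) := by
      rw [PySem.List.pyRange_one, List.foldl_map]
      rw [show (ap - 0).toNat = (ap - 1).toNat + 1 by rw [hlenmap] at hcond; omega]
      exact pvFold_range xs b (ap - 1).toNat hlen
    rw [hfold]
    have hgetD : (ps.map (fun p : Nat => (p : Int))).getD (ap - 1).toNat 0
        = ((ps[(ap - 1).toNat] : Int)) := by
      rw [List.getD_eq_getElem _ _ (by rw [hlenmap]; exact hlen), List.getElem_map]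
    rw [hgetD]
    unfold pvDoSlice
    cases inc <;> by_cases hrm : rm = "Before" <;> simp [hrm]
  · rw [if_neg hcond, if_pos (by rw [hlenmap] at hcond; omega)]
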